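-- pv_equiv track=rewrite | github.com/huikinglam02gmail/Leetcode_solutions | 3633.earliest-finish-time-for-land-and-water-rides-i.py | earliestFinishTime
-- ===== SOURCE A (Python) =====
-- from typing import List
--
-- def earliestFinishTime(landStartTime: List[int], landDuration: List[int], waterStartTime: List[int], waterDuration: List[int]) -> int:
--     result = float("inf")
--     for sl, dl in zip(landStartTime, landDuration):
--         for sw, dw in zip(waterStartTime, waterDuration):
--             if sl + dl <= sw: result = min(result, sw + dw)
--             else: result = min(result, sl + dl + dw)
--
--     for sw, dw in zip(waterStartTime, waterDuration):
--         for sl, dl in zip(landStartTime, landDuration):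
--             if sw + dw <= sl: result = min(result, sl + dl)
--             else: result = min(result, sw + dw + dl)
--     return result
-- ===== SOURCE B (Python) =====
-- def earliestFinishTime(landStartTime, landDuration, waterStartTime, waterDuration):
--     landFinish = min(s + d for s, d in zip(landStartTime, landDuration))
--     waterFinish = min(s + d for s, d in zip(waterStartTime, waterDuration))
--     landFirst = min(max(landFinish, s) + d for s, d in zip(waterStartTime, waterDuration))
--     waterFirst = min(max(waterFinish, s) + d for s, d in zip(landStartTime, landDuration))
--     return min(landFirst, waterFirst)
-- ===== Notes on version B (the rewrite author's own statement) =====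
-- stated objective: faster
-- what changed: Replaced the two O(n*m) nested scans with four independent linear passes: since each cross candidate equals max(finish, start)+duration and max is monotone, the minimum first-ride finish time can be computed once per side and then combined in a single pass over the other side.
-- outside the precondition, e.g. on earliestFinishTime([], [], [1], [1]): A returns inf, B raises ValueError
import Mathlib
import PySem

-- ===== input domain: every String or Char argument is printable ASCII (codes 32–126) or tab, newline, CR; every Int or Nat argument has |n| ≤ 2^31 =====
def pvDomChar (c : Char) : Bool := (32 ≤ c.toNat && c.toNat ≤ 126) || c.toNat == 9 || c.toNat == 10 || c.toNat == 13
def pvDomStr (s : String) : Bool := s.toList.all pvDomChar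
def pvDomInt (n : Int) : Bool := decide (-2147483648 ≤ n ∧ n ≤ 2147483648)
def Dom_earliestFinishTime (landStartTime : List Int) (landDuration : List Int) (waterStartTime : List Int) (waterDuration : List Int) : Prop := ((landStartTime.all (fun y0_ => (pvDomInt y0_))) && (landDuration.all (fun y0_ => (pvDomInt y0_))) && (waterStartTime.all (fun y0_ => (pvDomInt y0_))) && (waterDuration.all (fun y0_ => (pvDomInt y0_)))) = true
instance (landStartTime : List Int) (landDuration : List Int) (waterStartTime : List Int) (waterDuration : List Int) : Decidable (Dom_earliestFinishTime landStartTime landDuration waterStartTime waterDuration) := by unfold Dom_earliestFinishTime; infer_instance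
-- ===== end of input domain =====

-- B replaces A's two O(n*m) nested scans by O(n+m): each side's minimum finish time is
-- computed once, then one pass over the other side combines them (max is monotone).

-- ===== PORT A =====
-- running `min` with Python's float('inf') start modelled as Option Int (none = inf)
def pyMin2 (acc : Option Int) (v : Int) : Option Int :=
  match acc with
  | none => some v
  | some a => some (min a v)

def earliestFinishTime (landStartTime : List Int) (landDuration : List Int) (waterStartTime : List Int) (waterDuration : List Int) : Int :=
  let r1 := (landStartTime.zip landDuration).foldl (fun acc p =>
      (waterStartTime.zip waterDuration).foldl (fun acc q =>
        if p.1 + p.2 ≤ q.1 then pyMin2 acc (q.1 + q.2) else pyMin2 acc (p.1 + p.2 + q.2)) acc) none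
  let r2 := (waterStartTime.zip waterDuration).foldl (fun acc q =>
      (landStartTime.zip landDuration).foldl (fun acc p =>
        if q.1 + q.2 ≤ p.1 then pyMin2 acc (p.1 + p.2) else pyMin2 acc (q.1 + q.2 + p.2)) acc) r1
  -- Python returns float('inf') when r2 is none; that case is outside Pre_ (not an int)
  r2.getD 0

-- ===== PORT B =====
def earliestFinishTime_alt (landStartTime : List Int) (landDuration : List Int) (waterStartTime : List Int) (waterDuration : List Int) : Int :=
  match PySem.List.min? ((landStartTime.zip landDuration).map (fun p => p.1 + p.2)) (fun x => x),
        PySem.List.min? ((waterStartTime.zip waterDuration).map (fun q => q.1 + q.2)) (fun x => x) with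
  | some landFinish, some waterFinish =>
      let landFirst := (PySem.List.min? ((waterStartTime.zip waterDuration).map (fun q => max landFinish q.1 + q.2)) (fun x => x)).getD 0
      let waterFirst := (PySem.List.min? ((landStartTime.zip landDuration).map (fun p => max waterFinish p.1 + p.2)) (fun x => x)).getD 0
      min landFirst waterFirst
  | _, _ => 0  -- Python B raises ValueError here (empty min); outside Pre_

-- ===== PRECONDITION & SPEC =====
-- Pre_ excludes inputs where some list is empty: there A returns float('inf'), which is
-- not a value of the declared int type (and B raises ValueError).
def Pre_earliestFinishTime (landStartTime : List Int) (landDuration : List Int) (waterStartTime : List Int) (waterDuration : List Int) : Prop :=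
  landStartTime ≠ [] ∧ landDuration ≠ [] ∧ waterStartTime ≠ [] ∧ waterDuration ≠ []
instance (landStartTime : List Int) (landDuration : List Int) (waterStartTime : List Int) (waterDuration : List Int) : Decidable (Pre_earliestFinishTime landStartTime landDuration waterStartTime waterDuration) := by unfold Pre_earliestFinishTime; infer_instance

def pvWitness_earliestFinishTime : List Int × List Int × List Int × List Int := ([2], [4], [8], [1])

def Spec_earliestFinishTime (landStartTime : List Int) (landDuration : List Int) (waterStartTime : List Int) (waterDuration : List Int) (out : Int) : Prop := out = earliestFinishTime_alt landStartTime landDuration waterStartTime waterDuration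
instance (landStartTime : List Int) (landDuration : List Int) (waterStartTime : List Int) (waterDuration : List Int) (out : Int) : Decidable (Spec_earliestFinishTime landStartTime landDuration waterStartTime waterDuration out) := by unfold Spec_earliestFinishTime; infer_instance

-- ===== CLAIM (what is proved, stated in full; the proofs are below) =====
def Claim_equal_earliestFinishTime : Prop := ∀ (landStartTime : List Int) (landDuration : List Int) (waterStartTime : List Int) (waterDuration : List Int), Dom_earliestFinishTime landStartTime landDuration waterStartTime waterDuration → Pre_earliestFinishTime landStartTime landDuration waterStartTime waterDuration → Spec_earliestFinishTime landStartTime landDuration waterStartTime waterDuration (earliestFinishTime landStartTime landDuration waterStartTime waterDuration)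

-- ===== LEMMAS AND PROOFS =====

-- option-min (none = +inf)
def omin (a b : Option Int) : Option Int :=
  match a, b with
  | none, b => b
  | some x, none => some x
  | some x, some y => some (min x y)

def mymin (l : List Int) : Option Int := l.foldl pyMin2 none

theorem omin_none_right (a : Option Int) : omin a none = a := by
  cases a <;> rfl

theorem omin_assoc_shape (acc : Option Int) (x : Int) (m : Option Int) :
    omin (pyMin2 acc x) m = omin acc (omin (some x) m) := by
  cases acc <;> cases m <;> simp [pyMin2, omin, min_assoc]

theorem foldl_pyMin2_acc (l : List Int) (acc : Option Int) :
    l.foldl pyMin2 acc = omin acc (mymin l) := by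
  induction l generalizing acc with
  | nil => simp [mymin, List.foldl, omin_none_right]
  | cons x t ih =>
    simp only [mymin, List.foldl]
    rw [ih (pyMin2 acc x), ih (pyMin2 none x)]
    exact omin_assoc_shape acc x (mymin t)

theorem foldl_some_min (t : List Int) (x : Int) :
    t.foldl pyMin2 (some x) = some (t.foldl min x) := by
  induction t generalizing x with
  | nil => rfl
  | cons y t ih => simp [List.foldl, pyMin2, ih]

theorem mymin_cons (x : Int) (t : List Int) :
    mymin (x :: t) = some (t.foldl min x) := by
  simp [mymin, List.foldl, pyMin2, foldl_some_min]

theorem foldl_min_mem (t : List Int) (x : Int) :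
    t.foldl min x = x ∨ t.foldl min x ∈ t := by
  induction t generalizing x with
  | nil => exact Or.inl rfl
  | cons y t ih =>
    rcases ih (min x y) with h | h
    · rcases min_choice x y with hm | hm
      · exact Or.inl (h.trans hm)
      · exact Or.inr (by simp [h.trans hm])
    · exact Or.inr (List.mem_cons_of_mem _ h)

theorem foldl_min_le (t : List Int) (x : Int) :
    t.foldl min x ≤ x ∧ ∀ z ∈ t, t.foldl min x ≤ z := by
  induction t generalizing x with
  | nil => exact ⟨le_refl x, by simp⟩
  | cons y t ih =>
    obtain ⟨h1, h2⟩ := ih (min x y)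
    refine ⟨h1.trans (min_le_left _ _), ?_⟩
    intro z hz
    rcases List.mem_cons.mp hz with rfl | hz
    · exact h1.trans (min_le_right _ _)
    · exact h2 z hz

theorem mymin_mem {l : List Int} {v : Int} (h : mymin l = some v) : v ∈ l := by
  cases l with
  | nil => simp [mymin, List.foldl] at h
  | cons x t =>
    rw [mymin_cons] at h
    obtain rfl : t.foldl min x = v := Option.some.inj h
    rcases foldl_min_mem t x with h' | h'
    · simp [h']
    · exact List.mem_cons_of_mem _ h'

theorem mymin_le {l : List Int} {v : Int} (h : mymin l = some v) :
    ∀ z ∈ l, v ≤ z := by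
  cases l with
  | nil => simp
  | cons x t =>
    rw [mymin_cons] at h
    obtain rfl : t.foldl min x = v := Option.some.inj h
    intro z hz
    rcases List.mem_cons.mp hz with rfl | hz
    · exact (foldl_min_le t z).1
    · exact (foldl_min_le t x).2 z hz

theorem mymin_isSome {l : List Int} (h : l ≠ []) : ∃ v, mymin l = some v := by
  cases l with
  | nil => exact absurd rfl h
  | cons x t => exact ⟨_, mymin_cons x t⟩

-- bridge: PySem's min with identity key is mymin
theorem pymin_eq_mymin (l : List Int) :
    PySem.List.min? l (fun x => x) = mymin l := by
  cases l with
  | nil =>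
    rw [mymin]
    exact (PySem.List.min?_eq_none_iff (xs := []) (key := fun x => x)).mpr rfl
  | cons x t => rw [PySem.List.min?_id_cons, mymin_cons]

-- A's folds flattened: nested foldl over zl with inner foldl over (f p) is foldl over the flatMap
theorem foldl_flatMap_pyMin2 {α : Type} (zl : List α) (f : α → List Int) (acc : Option Int) :
    zl.foldl (fun a p => (f p).foldl pyMin2 a) acc = (zl.flatMap f).foldl pyMin2 acc := by
  induction zl generalizing acc with
  | nil => rfl
  | cons p t ih => simp [List.flatMap_cons, List.foldl_append, ih]

-- the key O(nm) → O(n+m) collapse: min over all pairs of max(fin p, q.1)+q.2 equals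
-- min over q of max(F, q.1)+q.2 where F is the minimal fin p
theorem collapse {α β : Type} (zl : List α) (zw : List β) (fin : α → Int)
    (st : β → Int) (du : β → Int) {F : Int}
    (hF : mymin (zl.map fin) = some F) (hzw : zw ≠ []) :
    mymin (zl.flatMap (fun p => zw.map (fun q => max (fin p) (st q) + du q)))
      = mymin (zw.map (fun q => max F (st q) + du q)) := by
  obtain ⟨p0, hp0mem, hp0⟩ := List.mem_map.mp (mymin_mem hF)
  have hzl : zl ≠ [] := by rintro rfl; simp at hp0mem
  obtain ⟨b, hb⟩ := mymin_isSome (l := zw.map (fun q => max F (st q) + du q))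
    (by simpa using hzw)
  have hflat : zl.flatMap (fun p => zw.map (fun q => max (fin p) (st q) + du q)) ≠ [] := by
    obtain ⟨q0, hq0⟩ := List.exists_mem_of_ne_nil zw hzw
    intro hnil
    have : max (fin p0) (st q0) + du q0 ∈
        zl.flatMap (fun p => zw.map (fun q => max (fin p) (st q) + du q)) :=
      List.mem_flatMap.mpr ⟨p0, hp0mem, List.mem_map.mpr ⟨q0, hq0, rfl⟩⟩
    simp [hnil] at this
  obtain ⟨a, ha⟩ := mymin_isSome hflat
  rw [ha, hb]
  congr 1
  apply le_antisymm
  · -- a ≤ b : b = max F (st q') + du q' with F = fin p0, so b's value is itself a pair candidate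
    obtain ⟨q', hq'mem, hq'⟩ := List.mem_map.mp (mymin_mem hb)
    have hmem : max F (st q') + du q' ∈
        zl.flatMap (fun p => zw.map (fun q => max (fin p) (st q) + du q)) :=
      List.mem_flatMap.mpr ⟨p0, hp0mem, List.mem_map.mpr ⟨q', hq'mem, by rw [hp0]⟩⟩
    calc a ≤ max F (st q') + du q' := mymin_le ha _ hmem
    _ = b := hq'
  · -- b ≤ a : a = max (fin p) (st q) + du q; F ≤ fin p so b ≤ max F (st q) + du q ≤ a
    obtain ⟨p, hpmem, hrest⟩ := List.mem_flatMap.mp (mymin_mem ha)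
    obtain ⟨q, hqmem, hq⟩ := List.mem_map.mp hrest
    have hFle : F ≤ fin p := mymin_le hF _ (List.mem_map.mpr ⟨p, hpmem, rfl⟩)
    calc b ≤ max F (st q) + du q :=
            mymin_le hb _ (List.mem_map.mpr ⟨q, hqmem, rfl⟩)
    _ ≤ max (fin p) (st q) + du q := by
          exact add_le_add (max_le_max hFle le_rfl) (le_refl (du q))
    _ = a := hq

theorem zip_ne_nil {α β : Type} {l1 : List α} {l2 : List β}
    (h1 : l1 ≠ []) (h2 : l2 ≠ []) : l1.zip l2 ≠ [] := by
  cases l1 with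
  | nil => exact absurd rfl h1
  | cons x t =>
    cases l2 with
    | nil => exact absurd rfl h2
    | cons y s => simp [List.zip]

-- ===== VERDICT (by name: the statement is the Claim_ definition above) =====
theorem earliestFinishTime_spec : Claim_equal_earliestFinishTime := by
  intro ls ld ws wd _ ⟨h1, h2, h3, h4⟩
  unfold Spec_earliestFinishTime earliestFinishTime earliestFinishTime_alt
  set zl := ls.zip ld with hzl
  set zw := ws.zip wd with hzw
  have hzlne : zl ≠ [] := zip_ne_nil h1 h2
  have hzwne : zw ≠ [] := zip_ne_nil h3 h4
  obtain ⟨F, hF⟩ := mymin_isSome (l := zl.map (fun p => p.1 + p.2)) (by simpa using hzlne)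
  obtain ⟨W, hW⟩ := mymin_isSome (l := zw.map (fun q => q.1 + q.2)) (by simpa using hzwne)
  -- rewrite A's step functions into pyMin2 of the max-form candidate
  have stepL : ∀ p : Int × Int,
      (fun (acc : Option Int) (q : Int × Int) =>
        if p.1 + p.2 ≤ q.1 then pyMin2 acc (q.1 + q.2) else pyMin2 acc (p.1 + p.2 + q.2))
      = fun acc q => pyMin2 acc (max (p.1 + p.2) q.1 + q.2) := by
    intro p; funext acc q; split_ifs with h <;> congr 1 <;> omega
  -- (both loop bodies have the same shape, so stepL rewrites both)
  simp only [stepL]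
  -- fold with pyMin2 over a map = fold over the mapped list
  have hmap : ∀ (z : List (Int × Int)) (h : Int × Int → Int) (acc : Option Int),
      z.foldl (fun a q => pyMin2 a (h q)) acc = (z.map h).foldl pyMin2 acc := by
    intro z h acc; rw [List.foldl_map]
  simp only [hmap]
  rw [foldl_flatMap_pyMin2, foldl_flatMap_pyMin2,
      show ∀ acc : Option Int,
        (zw.flatMap (fun q => zl.map (fun p => max (q.1 + q.2) p.1 + p.2))).foldl pyMin2 acc
        = omin acc (mymin (zw.flatMap (fun q => zl.map (fun p => max (q.1 + q.2) p.1 + p.2))))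
        from fun acc => foldl_pyMin2_acc _ acc]
  have hA1 : (zl.flatMap (fun p => zw.map (fun q => max (p.1 + p.2) q.1 + q.2))).foldl pyMin2 none
      = mymin (zw.map (fun q => max F q.1 + q.2)) := by
    rw [show (zl.flatMap (fun p => zw.map (fun q => max (p.1 + p.2) q.1 + q.2))).foldl pyMin2 none
        = mymin (zl.flatMap (fun p => zw.map (fun q => max (p.1 + p.2) q.1 + q.2))) from rfl]
    exact collapse zl zw (fun p => p.1 + p.2) (fun q => q.1) (fun q => q.2) hF hzwne
  have hA2 : mymin (zw.flatMap (fun q => zl.map (fun p => max (q.1 + q.2) p.1 + p.2)))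
      = mymin (zl.map (fun p => max W p.1 + p.2)) :=
    collapse zw zl (fun q => q.1 + q.2) (fun p => p.1) (fun p => p.2) hW hzlne
  rw [hA1, hA2]
  obtain ⟨b1, hb1⟩ := mymin_isSome (l := zw.map (fun q => max F q.1 + q.2)) (by simpa using hzwne)
  obtain ⟨b2, hb2⟩ := mymin_isSome (l := zl.map (fun p => max W p.1 + p.2)) (by simpa using hzlne)
  rw [pymin_eq_mymin, pymin_eq_mymin, hF, hW]
  simp only [pymin_eq_mymin, hb1, hb2, omin, Option.getD_some]
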